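-- pv_equiv track=rewrite | github.com/Bwgo/Python_demineur | projet/client/clauses.py | generation_dicoVar
-- ===== SOURCE A (Python) =====
-- def generation_dicoVar(height: int, width: int) -> dict:
--     counter = 1
--     dico = {}
--     for i in range(height):
--         for j in range(width):
--             for value in range(5):  # longueur du dictionnaire de vocabulaire
--                 key = str(i) + "," + str(j) + "," + str(value)
--                 dico[key] = counter
--                 counter += 1
--     return dico
-- ===== SOURCE B (Python) =====
-- def generation_dicoVar(height: int, width: int) -> dict:
--     # single flat loop: the counter n+1 is decoded into (i, j, value) by divmod
--     if height <= 0 or width <= 0: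
--         return {}
--     dico = {}
--     for n in range(5 * height * width):
--         i, r = divmod(n, 5 * width)
--         j, v = divmod(r, 5)
--         dico[str(i) + "," + str(j) + "," + str(v)] = n + 1
--     return dico
-- ===== Notes on version B (the rewrite author's own statement) =====
-- stated objective: alternative
-- what changed: Replaced the three nested loops with a running counter by a single flat loop over range(5*height*width) that decodes each position n into (i, j, value) with two divmods.
import Mathlib
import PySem

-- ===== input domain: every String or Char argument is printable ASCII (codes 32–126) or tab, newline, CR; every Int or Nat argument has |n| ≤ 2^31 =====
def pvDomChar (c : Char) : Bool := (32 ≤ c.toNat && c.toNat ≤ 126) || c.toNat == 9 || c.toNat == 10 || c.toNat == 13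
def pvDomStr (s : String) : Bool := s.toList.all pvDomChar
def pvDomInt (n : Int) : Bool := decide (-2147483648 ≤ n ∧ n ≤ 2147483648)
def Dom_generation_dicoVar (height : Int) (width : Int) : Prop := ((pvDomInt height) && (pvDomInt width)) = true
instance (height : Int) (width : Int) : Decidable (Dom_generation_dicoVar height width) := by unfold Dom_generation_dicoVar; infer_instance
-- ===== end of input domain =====

-- B replaces A's three nested loops with a running counter by one flat loop over
-- range(5*height*width) that decodes each position into (i, j, value) by divmod (alternative).

-- ===== PORT A =====
-- key = str(i) + "," + str(j) + "," + str(value)  (used verbatim by both Pythons)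
def pvKey (i j v : Int) : String :=
  PySem.Int.toStr i ++ "," ++ PySem.Int.toStr j ++ "," ++ PySem.Int.toStr v

def generation_dicoVar (height : Int) (width : Int) : List (String × Int) :=
  ((PySem.List.pyRange 0 height 1).foldl (fun st i =>
     (PySem.List.pyRange 0 width 1).foldl (fun st j =>
       (PySem.List.pyRange 0 5 1).foldl (fun (st : PySem.Dict String Int × Int) v =>
         (st.1.insert (pvKey i j v) st.2, st.2 + 1)) st) st)
   ((PySem.Dict.empty : PySem.Dict String Int), 1)).1.items

-- ===== PORT B =====
def generation_dicoVar_alt (height : Int) (width : Int) : List (String × Int) :=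
  if height ≤ 0 ∨ width ≤ 0 then []
  else
    ((PySem.List.pyRange 0 (5 * height * width) 1).foldl
      (fun (d : PySem.Dict String Int) n =>
        let i := PySem.Int.floordiv n (5 * width)
        let r := PySem.Int.mod n (5 * width)
        let j := PySem.Int.floordiv r 5
        let v := PySem.Int.mod r 5
        d.insert (pvKey i j v) (n + 1))
      PySem.Dict.empty).items

-- ===== PRECONDITION & SPEC =====
def Spec_generation_dicoVar (height : Int) (width : Int) (out : List (String × Int)) : Prop := out = generation_dicoVar_alt height width
instance (height : Int) (width : Int) (out : List (String × Int)) : Decidable (Spec_generation_dicoVar height width out) := by unfold Spec_generation_dicoVar; infer_instance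

-- ===== CLAIM (what is proved, stated in full; the proofs are below) =====
def Claim_equal_generation_dicoVar : Prop := ∀ (height : Int) (width : Int), Dom_generation_dicoVar height width → Spec_generation_dicoVar height width (generation_dicoVar height width)

-- ===== LEMMAS AND PROOFS =====

-- the shared insert step on (key, value) pairs
def pvIns (d : PySem.Dict String Int) (kv : String × Int) : PySem.Dict String Int :=
  d.insert kv.1 kv.2

-- the entries produced for one cell (i, j)
def pvCellB (w i j : Int) : List (String × Int) :=
  (PySem.List.pyRange 0 5 1).map fun v => (pvKey i j v, 1 + 5 * (w * i + j) + v)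

-- B's loop body, named (definitionally equal to the lambda in the port)
def pvInsB (w : Int) (d : PySem.Dict String Int) (n : Int) : PySem.Dict String Int :=
  d.insert (pvKey (PySem.Int.floordiv n (5 * w))
                  (PySem.Int.floordiv (PySem.Int.mod n (5 * w)) 5)
                  (PySem.Int.mod (PySem.Int.mod n (5 * w)) 5)) (n + 1)

lemma pvRange5 : PySem.List.pyRange 0 5 1 = [0, 1, 2, 3, 4] := by decide

-- A's innermost loop: the five counter values are the closed forms
lemma pvCell (w i j : Int) (d : PySem.Dict String Int) (c : Int)
    (hc : c = 1 + 5 * (w * i + j)) :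
    (PySem.List.pyRange 0 5 1).foldl (fun (st : PySem.Dict String Int × Int) v =>
        (st.1.insert (pvKey i j v) st.2, st.2 + 1)) (d, c)
      = ((pvCellB w i j).foldl pvIns d, c + 5) := by
  subst hc
  simp only [pvRange5, pvCellB, pvIns, List.map, List.foldl]
  rw [Prod.mk.injEq]
  constructor
  · ring_nf
  · ring

-- A's middle loop over j, with the counter invariant
lemma pvRow (w i : Int) : ∀ (n : Nat) (j : Int) (d : PySem.Dict String Int),
    (w - j).toNat = n →
    (PySem.List.pyRange j w 1).foldl (fun st j' =>
        (PySem.List.pyRange 0 5 1).foldl (fun (st : PySem.Dict String Int × Int) v =>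
          (st.1.insert (pvKey i j' v) st.2, st.2 + 1)) st) (d, 1 + 5 * (w * i + j))
      = (((PySem.List.pyRange j w 1).flatMap (pvCellB w i)).foldl pvIns d,
         1 + 5 * (w * i + max j w)) := by
  intro n
  induction n with
  | zero =>
    intro j d hn
    have hj : w ≤ j := by omega
    rw [PySem.List.pyRange_one_eq_nil hj]
    simp [max_eq_left hj]
  | succ m ih =>
    intro j d hn
    have hj : j < w := by omega
    rw [PySem.List.pyRange_one_cons hj]
    simp only [List.foldl_cons, List.flatMap_cons, List.foldl_append]
    rw [pvCell w i j d _ rfl]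
    have h1 : 1 + 5 * (w * i + j) + 5 = 1 + 5 * (w * i + (j + 1)) := by ring
    rw [h1, ih (j + 1) _ (by omega)]
    have h2 : max (j + 1) w = max j w := by omega
    rw [h2]

-- A's outer loop for 0 ≤ w
lemma pvOuter (h w : Int) (hw : 0 ≤ w) : ∀ (n : Nat) (i : Int) (d : PySem.Dict String Int),
    (h - i).toNat = n →
    (PySem.List.pyRange i h 1).foldl (fun st i' =>
        (PySem.List.pyRange 0 w 1).foldl (fun st j =>
          (PySem.List.pyRange 0 5 1).foldl (fun (st : PySem.Dict String Int × Int) v =>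
            (st.1.insert (pvKey i' j v) st.2, st.2 + 1)) st) st) (d, 1 + 5 * (w * i))
      = (((PySem.List.pyRange i h 1).flatMap (fun i' =>
            (PySem.List.pyRange 0 w 1).flatMap (pvCellB w i'))).foldl pvIns d,
         1 + 5 * (w * max i h)) := by
  intro n
  induction n with
  | zero =>
    intro i d hn
    have hi : h ≤ i := by omega
    rw [PySem.List.pyRange_one_eq_nil hi]
    simp [max_eq_left hi]
  | succ m ih =>
    intro i d hn
    have hi : i < h := by omega
    rw [PySem.List.pyRange_one_cons hi]
    simp only [List.foldl_cons, List.flatMap_cons, List.foldl_append]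
    have hrow := pvRow w i (w - 0).toNat 0 d (by omega)
    rw [add_zero] at hrow
    rw [hrow]
    have hmax : max 0 w = w := max_eq_right hw
    have h1 : 1 + 5 * (w * i + max 0 w) = 1 + 5 * (w * (i + 1)) := by rw [hmax]; ring
    rw [h1, ih (i + 1) _ (by omega)]
    have h2 : max (i + 1) h = max i h := by omega
    rw [h2]

-- B's decode step recovers (i, j, v) from the flat position 5*(w*i+j)+v
lemma pvDecode (w i j v : Int) (hw : 0 < w) (hj0 : 0 ≤ j) (hj : j < w)
    (hv0 : 0 ≤ v) (hv : v < 5) (d : PySem.Dict String Int) :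
    pvInsB w d (5 * (w * i + j) + v) = d.insert (pvKey i j v) (1 + 5 * (w * i + j) + v) := by
  have h5w : (0 : Int) < 5 * w := by omega
  have hr0 : (0 : Int) ≤ 5 * j + v := by omega
  have hrlt : 5 * j + v < 5 * w := by omega
  have heq : 5 * (w * i + j) + v = (5 * j + v) + i * (5 * w) := by ring
  have hdiv : PySem.Int.floordiv (5 * (w * i + j) + v) (5 * w) = i := by
    rw [PySem.Int.floordiv_eq_ediv_of_pos h5w, heq,
        Int.add_mul_ediv_right _ _ (ne_of_gt h5w),
        Int.ediv_eq_zero_of_lt hr0 hrlt, zero_add]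
  have hmod : PySem.Int.mod (5 * (w * i + j) + v) (5 * w) = 5 * j + v := by
    rw [PySem.Int.mod_eq_emod_of_pos h5w, heq, Int.add_mul_emod_self_right,
        Int.emod_eq_of_lt hr0 hrlt]
  have heq2 : 5 * j + v = v + j * 5 := by ring
  have hdiv2 : PySem.Int.floordiv (5 * j + v) 5 = j := by
    rw [PySem.Int.floordiv_eq_ediv_of_pos (by omega), heq2,
        Int.add_mul_ediv_right _ _ (by omega : (5:Int) ≠ 0),
        Int.ediv_eq_zero_of_lt hv0 hv, zero_add]
  have hmod2 : PySem.Int.mod (5 * j + v) 5 = v := by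
    rw [PySem.Int.mod_eq_emod_of_pos (by omega), heq2, Int.add_mul_emod_self_right,
        Int.emod_eq_of_lt hv0 hv]
  unfold pvInsB
  rw [hdiv, hmod, hdiv2, hmod2]
  congr 1
  ring

lemma pvRange5' (a : Int) : PySem.List.pyRange a (a + 5) 1 = [a, a + 1, a + 2, a + 3, a + 4] := by
  rw [PySem.List.pyRange_one_cons (by omega), PySem.List.pyRange_one_cons (by omega),
      PySem.List.pyRange_one_cons (by omega), PySem.List.pyRange_one_cons (by omega),
      PySem.List.pyRange_one_cons (by omega), PySem.List.pyRange_one_eq_nil (by omega)]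
  norm_num
  omega

-- one cell's worth of B's flat loop equals folding the cell's pairs
lemma pvBcell (w i j : Int) (hw : 0 < w) (hj0 : 0 ≤ j) (hj : j < w) (d : PySem.Dict String Int) :
    (PySem.List.pyRange (5 * (w * i + j)) (5 * (w * i + j) + 5) 1).foldl (pvInsB w) d
      = (pvCellB w i j).foldl pvIns d := by
  rw [pvRange5']
  simp only [pvCellB, pvRange5, List.map, List.foldl, pvIns, add_zero]
  have h0 := pvDecode w i j 0 hw hj0 hj (by omega) (by omega) d
  simp only [add_zero] at h0
  rw [h0]
  rw [pvDecode w i j 1 hw hj0 hj (by omega) (by omega)]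
  rw [pvDecode w i j 2 hw hj0 hj (by omega) (by omega)]
  rw [pvDecode w i j 3 hw hj0 hj (by omega) (by omega)]
  rw [pvDecode w i j 4 hw hj0 hj (by omega) (by omega)]

-- one row's worth of B's flat loop
lemma pvBrow (w i : Int) (hw : 0 < w) : ∀ (n : Nat) (j : Int) (d : PySem.Dict String Int),
    0 ≤ j → (w - j).toNat = n →
    (PySem.List.pyRange (5 * (w * i + j)) (5 * (w * i + w)) 1).foldl (pvInsB w) d
      = ((PySem.List.pyRange j w 1).flatMap (pvCellB w i)).foldl pvIns d := by
  intro n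
  induction n with
  | zero =>
    intro j d hj0 hn
    have hj : w ≤ j := by omega
    rw [PySem.List.pyRange_one_eq_nil hj, PySem.List.pyRange_one_eq_nil (by nlinarith)]
    rfl
  | succ m ih =>
    intro j d hj0 hn
    have hj : j < w := by omega
    rw [PySem.List.pyRange_one_cons hj]
    rw [PySem.List.pyRange_one_append (5 * (w * i + j)) (5 * (w * i + j) + 5)
        (5 * (w * i + w)) (by omega) (by nlinarith)]
    simp only [List.foldl_append, List.flatMap_cons, List.foldl_append]
    rw [pvBcell w i j hw hj0 hj]
    rw [show 5 * (w * i + j) + 5 = 5 * (w * i + (j + 1)) by ring]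
    exact ih (j + 1) _ (by omega) (by omega)

-- B's whole flat loop
lemma pvBouter (h w : Int) (hw : 0 < w) : ∀ (n : Nat) (i : Int) (d : PySem.Dict String Int),
    0 ≤ i → (h - i).toNat = n →
    (PySem.List.pyRange (5 * (w * i)) (5 * (w * h)) 1).foldl (pvInsB w) d
      = ((PySem.List.pyRange i h 1).flatMap (fun i' =>
            (PySem.List.pyRange 0 w 1).flatMap (pvCellB w i'))).foldl pvIns d := by
  intro n
  induction n with
  | zero =>
    intro i d hi0 hn
    have hi : h ≤ i := by omega
    rw [PySem.List.pyRange_one_eq_nil hi, PySem.List.pyRange_one_eq_nil (by nlinarith)]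
    rfl
  | succ m ih =>
    intro i d hi0 hn
    have hi : i < h := by omega
    rw [PySem.List.pyRange_one_cons hi]
    rw [PySem.List.pyRange_one_append (5 * (w * i)) (5 * (w * (i + 1))) (5 * (w * h))
        (by nlinarith) (by nlinarith)]
    simp only [List.foldl_append, List.flatMap_cons, List.foldl_append]
    have hrow := pvBrow w i hw (w - 0).toNat 0 d (by omega) (by omega)
    rw [add_zero] at hrow
    rw [show 5 * (w * (i + 1)) = 5 * (w * i + w) by ring, hrow]
    rw [show (5 : Int) * (w * i + w) = 5 * (w * (i + 1)) by ring]
    exact ih (i + 1) _ (by omega) (by omega)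

-- ===== VERDICT (by name: the statement is the Claim_ definition above) =====
theorem generation_dicoVar_spec : Claim_equal_generation_dicoVar := by
  intro height width _
  unfold Spec_generation_dicoVar generation_dicoVar generation_dicoVar_alt
  by_cases hz : height ≤ 0 ∨ width ≤ 0
  · rw [if_pos hz]
    rcases hz with hz | hz
    · rw [PySem.List.pyRange_one_eq_nil hz]
      rfl
    · have hnil : PySem.List.pyRange 0 width 1 = [] :=
        PySem.List.pyRange_one_eq_nil hz
      rw [hnil]
      have hid : ∀ (l : List Int),
          List.foldl (fun (st : PySem.Dict String Int × Int) _ => st)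
            ((PySem.Dict.empty : PySem.Dict String Int), (1 : Int)) l
            = ((PySem.Dict.empty : PySem.Dict String Int), (1 : Int)) := by
        intro l
        induction l with
        | nil => rfl
        | cons x t iht => simp [List.foldl_cons, iht]
      simp only [List.foldl_nil, hid]
      rfl
  · have hh : 0 < height := by omega
    have hw : 0 < width := by omega
    rw [if_neg hz]
    have hfun : (fun (d : PySem.Dict String Int) n =>
        let i := PySem.Int.floordiv n (5 * width)
        let r := PySem.Int.mod n (5 * width)
        let j := PySem.Int.floordiv r 5
        let v := PySem.Int.mod r 5
        d.insert (pvKey i j v) (n + 1)) = pvInsB width := rfl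
    rw [hfun]
    have hA := pvOuter height width (by omega) (height - 0).toNat 0 PySem.Dict.empty (by omega)
    rw [show (1 : Int) + 5 * (width * 0) = 1 by ring] at hA
    rw [hA]
    have hB := pvBouter height width hw (height - 0).toNat 0 PySem.Dict.empty (by omega) (by omega)
    rw [show (5 : Int) * (width * 0) = 0 by ring] at hB
    rw [show (5 : Int) * height * width = 5 * (width * height) by ring, hB]
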